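-- pv_equiv track=rewrite | github.com/mathcoder9/advent2023 | src/Day11/day11.py | expand_coords
-- ===== SOURCE A (Python) =====
-- from typing import List
--
-- def expand_coords(positions: List[int], expansion_rate: int) -> List[int]:
--     prev = -1
--     res = [-1]
--     for position in positions:
--         if position == prev:
--             res.append(res[-1])
--         elif position == prev + 1:
--             res.append(1 + res[-1])
--         elif position != prev + 1:
--             new_diff = expansion_rate * (position - prev - 1)
--             res.append(new_diff + res[-1] + 1)
--         prev = position
--
--     return res[1:]
-- ===== SOURCE B (Python) =====
-- from typing import List
--
-- def expand_coords(positions: List[int], expansion_rate: int) -> List[int]: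
--     gaps = 0
--     prev = -1
--     out = []
--     for p in positions:
--         if p != prev:
--             gaps += p - prev - 1
--             prev = p
--         out.append(p + (expansion_rate - 1) * gaps)
--     return out
-- ===== Notes on version B (the rewrite author's own statement) =====
-- stated objective: simpler
-- what changed: B computes each expanded coordinate directly as position + (rate-1)*cumulative_gap from a running gap counter, instead of chaining increments off the previously appended output via res[-1] with a -1 sentinel and a final slice.
import Mathlib
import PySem

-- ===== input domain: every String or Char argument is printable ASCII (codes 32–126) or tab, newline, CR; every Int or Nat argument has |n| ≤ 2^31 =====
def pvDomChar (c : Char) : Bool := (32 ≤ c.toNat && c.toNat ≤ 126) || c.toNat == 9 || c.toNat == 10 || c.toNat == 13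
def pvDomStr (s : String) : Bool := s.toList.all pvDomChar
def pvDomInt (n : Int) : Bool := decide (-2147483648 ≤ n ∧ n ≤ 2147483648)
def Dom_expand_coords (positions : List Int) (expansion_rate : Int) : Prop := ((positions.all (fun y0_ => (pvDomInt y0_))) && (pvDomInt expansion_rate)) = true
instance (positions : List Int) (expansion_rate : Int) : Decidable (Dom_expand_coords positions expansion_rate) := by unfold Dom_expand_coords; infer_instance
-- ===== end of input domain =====

-- B replaces A's chain of increments off the previous output (with a -1 sentinel and a final
-- slice) by a running cumulative gap counter: each output is position + (rate-1)*gaps. Objective: simpler.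


-- ===== PORT A =====
-- res[-1] is read as res.getLast?.getD 0; res is never empty (it starts as [-1]), so the
-- default is never used and the read is exact Python res[-1]. res[1:] is the final slice.
def expand_coords (positions : List Int) (expansion_rate : Int) : List Int :=
  let st := positions.foldl (fun (s : Int × List Int) position =>
    let prev := s.1
    let res := s.2
    if position = prev then
      (position, res ++ [res.getLast?.getD 0])
    else if position = prev + 1 then
      (position, res ++ [1 + res.getLast?.getD 0])
    else
      let new_diff := expansion_rate * (position - prev - 1)
      (position, res ++ [new_diff + res.getLast?.getD 0 + 1])) (-1, [-1])
  PySem.List.slice st.2 (some 1) none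

-- ===== PORT B =====
def expand_coords_alt (positions : List Int) (expansion_rate : Int) : List Int :=
  let st := positions.foldl (fun (s : Int × Int × List Int) p =>
    let gaps := s.1
    let prev := s.2.1
    let out := s.2.2
    if p ≠ prev then
      (gaps + (p - prev - 1), p, out ++ [p + (expansion_rate - 1) * (gaps + (p - prev - 1))])
    else
      (gaps, prev, out ++ [p + (expansion_rate - 1) * gaps])) (0, -1, ([] : List Int))
  st.2.2

-- ===== PRECONDITION & SPEC =====
def Spec_expand_coords (positions : List Int) (expansion_rate : Int) (out : List Int) : Prop := out = expand_coords_alt positions expansion_rate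
instance (positions : List Int) (expansion_rate : Int) (out : List Int) : Decidable (Spec_expand_coords positions expansion_rate out) := by unfold Spec_expand_coords; infer_instance

-- ===== CLAIM (what is proved, stated in full; the proofs are below) =====
def Claim_equal_expand_coords : Prop := ∀ (positions : List Int) (expansion_rate : Int), Dom_expand_coords positions expansion_rate → Spec_expand_coords positions expansion_rate (expand_coords positions expansion_rate)

-- ===== LEMMAS AND PROOFS =====

-- common specification of the per-element outputs
def specOut (r : Int) : List Int → Int → Int → List Int
  | [], _, _ => []
  | p :: rest, prev, gaps =>
    let g' := if p = prev then gaps else gaps + (p - prev - 1)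
    (p + (r - 1) * g') :: specOut r rest p g'

lemma loopA_eq (r : Int) : ∀ (l : List Int) (prev gaps : Int) (res : List Int),
    res.getLast?.getD 0 = prev + (r - 1) * gaps →
    (l.foldl (fun (s : Int × List Int) position =>
      if position = s.1 then (position, s.2 ++ [s.2.getLast?.getD 0])
      else if position = s.1 + 1 then (position, s.2 ++ [1 + s.2.getLast?.getD 0])
      else (position, s.2 ++ [r * (position - s.1 - 1) + s.2.getLast?.getD 0 + 1])) (prev, res)).2
    = res ++ specOut r l prev gaps := by
  intro l
  induction l with
  | nil => intro prev gaps res h; simp [specOut]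
  | cons p rest ih =>
    intro prev gaps res h
    simp only [List.foldl_cons, specOut]
    by_cases h1 : p = prev
    · rw [if_pos h1, ih p gaps (res ++ [res.getLast?.getD 0]) (by simp [h, h1])]
      simp [h, h1]
    · rw [if_neg h1]
      by_cases h2 : p = prev + 1
      · rw [if_pos h2]
        have hg : (1 : Int) + res.getLast?.getD 0 = p + (r - 1) * (gaps + (p - prev - 1)) := by
          rw [h]; subst h2; ring
        rw [ih p (gaps + (p - prev - 1)) _ (by simp [hg])]
        simp [if_neg h1, hg]
      · rw [if_neg h2]
        have hg : r * (p - prev - 1) + res.getLast?.getD 0 + 1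
            = p + (r - 1) * (gaps + (p - prev - 1)) := by
          rw [h]; ring
        rw [ih p (gaps + (p - prev - 1)) _ (by simp [hg])]
        simp [if_neg h1, hg]

lemma loopB_eq (r : Int) : ∀ (l : List Int) (gaps prev : Int) (out : List Int),
    (l.foldl (fun (s : Int × Int × List Int) p =>
      if p ≠ s.2.1 then
        (s.1 + (p - s.2.1 - 1), p, s.2.2 ++ [p + (r - 1) * (s.1 + (p - s.2.1 - 1))])
      else
        (s.1, s.2.1, s.2.2 ++ [p + (r - 1) * s.1])) (gaps, prev, out)).2.2
    = out ++ specOut r l prev gaps := by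
  intro l
  induction l with
  | nil => intro gaps prev out; simp [specOut]
  | cons p rest ih =>
    intro gaps prev out
    simp only [List.foldl_cons, specOut]
    by_cases h1 : p = prev
    · rw [if_neg (by simp [h1]), ih]
      simp [h1]
    · rw [if_pos h1, ih]
      simp [h1]

-- ===== VERDICT (by name: the statement is the Claim_ definition above) =====
theorem expand_coords_spec : Claim_equal_expand_coords := by
  intro positions r _
  show expand_coords positions r = expand_coords_alt positions r
  simp only [expand_coords, expand_coords_alt]
  rw [loopA_eq r positions (-1) 0 [-1] (by simp), loopB_eq r positions 0 (-1) []]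
  simp [PySem.List.slice_from_one]
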